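-- pv_equiv track=rewrite | github.com/21A91A6142/leetcodetogithub | 4290-valid-elements-in-an-array/valid-elements-in-an-array.py | findValidElements
-- ===== SOURCE A (Python) =====
-- def findValidElements(nums: list[int]) -> list[int]:
--     if len(nums)<=2:
--         return nums
--     lst=[]
--     lst.append(nums[0])
--     for i in range(1,len(nums)-1):
--         if nums[i]>max(nums[:i]) or nums[i]>max(nums[i+1:]):
--             lst.append(nums[i])
--     lst.append(nums[-1])
--     return lst
-- ===== SOURCE B (Python) =====
-- def findValidElements(nums: list[int]) -> list[int]:
--     n = len(nums)
--     if n <= 2: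
--         return nums
--     last = nums[-1]
--     # suffix maxima built back to front: suf[i] = max(nums[i:])
--     rsuf = [last]
--     cur = last
--     for x in reversed(nums[:-1]):
--         cur = max(x, cur)
--         rsuf.append(cur)
--     suf = rsuf[::-1]
--     out = [nums[0]]
--     best = nums[0]        # running prefix max of nums[:i]
--     for i in range(1, n - 1):
--         x = nums[i]
--         if x > best or x > suf[i + 1]:
--             out.append(x)
--         best = max(best, x)
--     return out + [last]
-- ===== Notes on version B (the rewrite author's own statement) =====
-- stated objective: faster
-- what changed: A re-scans the whole prefix nums[:i] and suffix nums[i+1:] with max() at every index; B precomputes a suffix-max array once and keeps a running prefix max, deciding each element in O(1) in a single pass.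
import Mathlib
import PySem

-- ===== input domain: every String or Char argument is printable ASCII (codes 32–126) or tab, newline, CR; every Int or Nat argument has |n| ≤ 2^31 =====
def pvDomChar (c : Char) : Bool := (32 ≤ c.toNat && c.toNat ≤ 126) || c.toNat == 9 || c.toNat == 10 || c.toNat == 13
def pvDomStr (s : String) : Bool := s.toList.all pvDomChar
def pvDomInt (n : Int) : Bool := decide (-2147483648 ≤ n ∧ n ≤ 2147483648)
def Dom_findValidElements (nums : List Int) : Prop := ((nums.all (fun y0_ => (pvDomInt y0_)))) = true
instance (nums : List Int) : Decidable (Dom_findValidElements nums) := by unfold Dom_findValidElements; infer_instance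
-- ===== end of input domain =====

-- B replaces A's per-index max() scans over the prefix and suffix slices (O(n^2)) by a
-- precomputed suffix-max array plus a running prefix max, one pass (O(n)).

-- max(l) for a list known nonempty at every call site (default unreachable there)
def pyMaxD (l : List Int) : Int := (PySem.List.max? l (fun y => y)).getD 0

-- ===== PORT A =====
def findValidElements (nums : List Int) : List Int :=
  if nums.length ≤ 2 then nums
  else
    let lst : List Int := [] ++ [PySem.List.pyGetD nums 0 0]
    let lst := (PySem.List.pyRange 1 ((nums.length : Int) - 1) 1).foldl
      (fun acc i =>
        if PySem.List.pyGetD nums i 0 > pyMaxD (PySem.List.slice nums none (some i)) ∨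
           PySem.List.pyGetD nums i 0 > pyMaxD (PySem.List.slice nums (some (i + 1)) none)
        then acc ++ [PySem.List.pyGetD nums i 0] else acc) lst
    lst ++ [PySem.List.pyGetD nums (-1) 0]

-- ===== PORT B =====
def findValidElements_alt (nums : List Int) : List Int :=
  if nums.length ≤ 2 then nums
  else
    let last := PySem.List.pyGetD nums (-1) 0
    let st := (PySem.List.slice nums none (some (-1))).reverse.foldl
      (fun (st : List Int × Int) x => (st.1 ++ [max x st.2], max x st.2)) ([last], last)
    let suf := st.1.reverse
    let st2 := (PySem.List.pyRange 1 ((nums.length : Int) - 1) 1).foldl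
      (fun (st : List Int × Int) i =>
        let x := PySem.List.pyGetD nums i 0
        ((if x > st.2 ∨ x > PySem.List.pyGetD suf (i + 1) 0 then st.1 ++ [x] else st.1),
         max st.2 x)) ([PySem.List.pyGetD nums 0 0], PySem.List.pyGetD nums 0 0)
    st2.1 ++ [last]

-- ===== PRECONDITION & SPEC =====
def Spec_findValidElements (nums : List Int) (out : List Int) : Prop := out = findValidElements_alt nums
instance (nums : List Int) (out : List Int) : Decidable (Spec_findValidElements nums out) := by unfold Spec_findValidElements; infer_instance

-- ===== CLAIM (what is proved, stated in full; the proofs are below) =====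
def Claim_equal_findValidElements : Prop := ∀ (nums : List Int), Dom_findValidElements nums → Spec_findValidElements nums (findValidElements nums)

-- ===== LEMMAS AND PROOFS =====


-- ---- max folding helpers ----

theorem foldr_max_pull (l : List Int) (a b : Int) :
    l.foldr max (max a b) = max a (l.foldr max b) := by
  induction l with
  | nil => rfl
  | cons x xs ih => simp only [List.foldr_cons, ih, max_left_comm]

theorem foldl_max_eq_foldr (l : List Int) (a : Int) :
    l.foldl max a = l.foldr max a := by
  induction l generalizing a with
  | nil => rfl
  | cons x xs ih =>
    rw [List.foldl_cons, ih, List.foldr_cons, max_comm a x, foldr_max_pull]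

theorem pyMaxD_cons (x : Int) (t : List Int) : pyMaxD (x :: t) = t.foldl max x := by
  simp [pyMaxD, PySem.List.max?_id_cons]

theorem pyMaxD_append_singleton (l : List Int) (z : Int) :
    pyMaxD (l ++ [z]) = l.foldr max z := by
  cases l with
  | nil => simp [pyMaxD_cons]
  | cons x t =>
    rw [List.cons_append, pyMaxD_cons, foldl_max_eq_foldr, List.foldr_append,
        List.foldr_cons, List.foldr_nil, max_comm z x, foldr_max_pull]
    rfl

theorem pyMaxD_concat (l : List Int) (hl : l ≠ []) (x : Int) :
    pyMaxD (l ++ [x]) = max (pyMaxD l) x := by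
  cases l with
  | nil => exact absurd rfl hl
  | cons a t =>
    rw [List.cons_append, pyMaxD_cons, List.foldl_append, List.foldl_cons,
        List.foldl_nil, pyMaxD_cons]

theorem pyMaxD_take_succ (nums : List Int) (j : Nat) (h1 : 1 ≤ j) (hj : j < nums.length) :
    max (pyMaxD (nums.take j)) (nums.getD j 0) = pyMaxD (nums.take (j + 1)) := by
  have htk : nums.take (j + 1) = nums.take j ++ [nums[j]] := by
    rw [List.take_add_one, List.getElem?_eq_getElem hj]; rfl
  have hne : nums.take j ≠ [] := by
    intro hnil
    have hlen' : (nums.take j).length = j := by rw [List.length_take]; omega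
    rw [hnil] at hlen'
    simp at hlen'
    omega
  rw [htk, pyMaxD_concat _ hne _, List.getD_eq_getElem _ _ hj]

-- ---- suffix-max array ----

def tailsMax : List Int → Int → List Int
  | [], _ => []
  | x :: xs, z => tailsMax xs z ++ [(x :: xs).foldr max z]

theorem fold_rev (q : List Int) (acc : List Int) (z : Int) :
    q.reverse.foldl (fun (st : List Int × Int) x => (st.1 ++ [max x st.2], max x st.2)) (acc, z)
      = (acc ++ tailsMax q z, q.foldr max z) := by
  induction q with
  | nil => simp [tailsMax]
  | cons x xs ih =>
    rw [List.reverse_cons, List.foldl_append, ih]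
    simp [tailsMax, List.append_assoc]

theorem sufGetD (q : List Int) (z : Int) : ∀ (j : Nat), j ≤ q.length →
    ((tailsMax q z).reverse ++ [z]).getD j 0 = (q.drop j).foldr max z := by
  induction q with
  | nil =>
    intro j hj
    have hj0 : j = 0 := by simpa using hj
    subst hj0; simp [tailsMax]
  | cons x xs ih =>
    intro j hj
    have hshape : (tailsMax (x :: xs) z).reverse ++ [z]
        = (x :: xs).foldr max z :: ((tailsMax xs z).reverse ++ [z]) := by
      simp [tailsMax]
    rw [hshape]
    cases j with
    | zero => simp
    | succ j =>
      rw [List.getD_cons_succ, List.drop_succ_cons]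
      exact ih j (by simpa using hj)

-- ---- the main loop invariant: A's fold equals B's fold, and B's running max is pyMaxD of the prefix ----

theorem loop_invariant (nums suf : List Int) (hne : nums ≠ [])
    (hsuf : ∀ k : Nat, k < nums.length → suf.getD k 0 = pyMaxD (nums.drop k)) :
    ∀ (j : Nat), 1 ≤ j → j ≤ nums.length - 1 →
    ((PySem.List.pyRange 1 (j : Int) 1).foldl
      (fun acc i =>
        if PySem.List.pyGetD nums i 0 > pyMaxD (PySem.List.slice nums none (some i)) ∨
           PySem.List.pyGetD nums i 0 > pyMaxD (PySem.List.slice nums (some (i + 1)) none)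
        then acc ++ [PySem.List.pyGetD nums i 0] else acc)
      [PySem.List.pyGetD nums 0 0]
      = ((PySem.List.pyRange 1 (j : Int) 1).foldl
          (fun (st : List Int × Int) i =>
            ((if PySem.List.pyGetD nums i 0 > st.2 ∨
                 PySem.List.pyGetD nums i 0 > PySem.List.pyGetD suf (i + 1) 0
              then st.1 ++ [PySem.List.pyGetD nums i 0] else st.1),
             max st.2 (PySem.List.pyGetD nums i 0)))
          ([PySem.List.pyGetD nums 0 0], PySem.List.pyGetD nums 0 0)).1)
    ∧ ((PySem.List.pyRange 1 (j : Int) 1).foldl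
          (fun (st : List Int × Int) i =>
            ((if PySem.List.pyGetD nums i 0 > st.2 ∨
                 PySem.List.pyGetD nums i 0 > PySem.List.pyGetD suf (i + 1) 0
              then st.1 ++ [PySem.List.pyGetD nums i 0] else st.1),
             max st.2 (PySem.List.pyGetD nums i 0)))
          ([PySem.List.pyGetD nums 0 0], PySem.List.pyGetD nums 0 0)).2
        = pyMaxD (nums.take j) := by
  intro j h1
  induction j, h1 using Nat.le_induction with
  | base =>
    intro hj
    have : PySem.List.pyRange 1 (1 : Int) 1 = [] := PySem.List.pyRange_one_eq_nil (by omega)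
    obtain ⟨a, t, rfl⟩ := List.exists_cons_of_ne_nil hne
    simp [this, pyMaxD_cons]
  | succ j h1 ih =>
    intro hj
    have hjn : j < nums.length := by omega
    have hjn1 : j + 1 < nums.length := by omega
    have hrange : PySem.List.pyRange 1 ((j : Int) + 1) 1
        = PySem.List.pyRange 1 (j : Int) 1 ++ [(j : Int)] :=
      PySem.List.pyRange_one_succ_right (by exact_mod_cast h1)
    obtain ⟨hA, hB⟩ := ih (by omega)
    have hcast : ((j : Nat) + 1 : Int) = (((j + 1 : Nat) : Int)) := by push_cast; ring
    -- the values at step i = j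
    have hx : PySem.List.pyGetD nums ((j : Nat) : Int) 0 = nums.getD j 0 := by
      simp [PySem.List.pyGetD_natCast]
    have hpre : pyMaxD (PySem.List.slice nums none (some ((j : Nat) : Int)))
        = pyMaxD (nums.take j) := by rw [PySem.List.slice_to_natCast]
    have hsufA : pyMaxD (PySem.List.slice nums (some (((j : Nat) : Int) + 1)) none)
        = pyMaxD (nums.drop (j + 1)) := by
      rw [hcast, PySem.List.slice_from_natCast]
    have hsufB : PySem.List.pyGetD suf (((j : Nat) : Int) + 1) 0 = pyMaxD (nums.drop (j + 1)) := by
      rw [hcast, PySem.List.pyGetD_natCast]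
      exact hsuf (j + 1) hjn1
    push_cast [hrange, List.foldl_append, List.foldl_cons, List.foldl_nil]
    rw [hx, hpre, hsufA, hsufB, hB, ← hA]
    refine ⟨by split <;> rfl, ?_⟩
    exact pyMaxD_take_succ nums j h1 hjn

theorem findValidElements_main : ∀ (nums : List Int), findValidElements nums = findValidElements_alt nums := by
  intro nums
  by_cases h2 : nums.length ≤ 2
  · simp [findValidElements, findValidElements_alt, h2]
  · rcases List.eq_nil_or_concat nums with rfl | ⟨p, z, rfl⟩
    · simp at h2
    · simp only [List.concat_eq_append] at h2 ⊢
      have hlen : 2 < (p ++ [z]).length := by omega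
      have hlast : PySem.List.pyGetD (p ++ [z]) (-1) 0 = z :=
        PySem.List.pyGetD_neg_one_append_singleton p z 0
      have hdl : PySem.List.slice (p ++ [z]) none (some (-1)) = p := by
        rw [PySem.List.slice_to_neg_one, List.dropLast_concat]
      have hsuffold := fold_rev p [z] z
      have hsuf : ∀ k : Nat, k < (p ++ [z]).length →
          (([z] ++ tailsMax p z).reverse).getD k 0 = pyMaxD ((p ++ [z]).drop k) := by
        intro k hk
        have hkle : k ≤ p.length := by
          simp at hk ⊢; omega
        have h1 : ([z] ++ tailsMax p z).reverse = (tailsMax p z).reverse ++ [z] := by simp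
        rw [h1, sufGetD _ _ k hkle, List.drop_append_of_le_length hkle,
            pyMaxD_append_singleton]
      have hj := loop_invariant (p ++ [z]) (([z] ++ tailsMax p z).reverse)
        (by simp) hsuf ((p ++ [z]).length - 1) (by simp at hlen ⊢; omega) (by omega)
      have hcastn : ((((p ++ [z]).length - 1 : Nat)) : Int) = ((p ++ [z]).length : Int) - 1 := by
        have h1 : 1 ≤ (p ++ [z]).length := by omega
        push_cast [Nat.cast_sub h1]
        ring
      simp only [findValidElements, findValidElements_alt, if_neg h2, List.nil_append]
      rw [hlast, hdl, hsuffold]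
      rw [hcastn] at hj
      rw [hj.1]

-- ===== VERDICT (by name: the statement is the Claim_ definition above) =====
theorem findValidElements_spec : Claim_equal_findValidElements := by
  intro nums _
  unfold Spec_findValidElements
  exact findValidElements_main nums
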